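-- pv_equiv track=rewrite | github.com/xeek-dev/squishmark | scripts/setup-worktree.py | infer_branch_type
-- ===== SOURCE A (Python) =====
-- LABEL_TO_TYPE: dict[str, str] = {
--     "bug": "fix",
--     "enhancement": "feat",
--     "documentation": "docs",
--     "dx": "chore",
-- }
--
-- def infer_branch_type(labels: list[dict]) -> str | None:
--     """Infer branch type from issue labels. Returns None if ambiguous."""
--     label_names = {label["name"].lower() for label in labels}
--     matches = []
--     for label_name, branch_type in LABEL_TO_TYPE.items():
--         if label_name in label_names:
--             matches.append(branch_type)
--
--     # Deduplicate — multiple labels could map to the same type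
--     unique_matches = list(dict.fromkeys(matches))
--     if len(unique_matches) == 1:
--         return unique_matches[0]
--     return None
-- ===== SOURCE B (Python) =====
-- LABEL_TO_TYPE: dict[str, str] = {
--     "bug": "fix",
--     "enhancement": "feat",
--     "documentation": "docs",
--     "dx": "chore",
-- }
--
-- def infer_branch_type(labels: list[dict]) -> str | None:
--     """Infer branch type from issue labels. Returns None if ambiguous."""
--     types = set()
--     for label in labels:
--         branch_type = LABEL_TO_TYPE.get(label["name"].lower())
--         if branch_type is not None:
--             types.add(branch_type)
--     if len(types) == 1:
--         return next(iter(types))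
--     return None
-- ===== Notes on version B (the rewrite author's own statement) =====
-- stated objective: simpler
-- what changed: B does a single pass over the input labels, looking each lowered name up in LABEL_TO_TYPE and collecting the distinct branch types in a set, instead of first building a name-set and then scanning the constant table while deduplicating a match list; it answers directly from the size of that set.
import Mathlib
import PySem

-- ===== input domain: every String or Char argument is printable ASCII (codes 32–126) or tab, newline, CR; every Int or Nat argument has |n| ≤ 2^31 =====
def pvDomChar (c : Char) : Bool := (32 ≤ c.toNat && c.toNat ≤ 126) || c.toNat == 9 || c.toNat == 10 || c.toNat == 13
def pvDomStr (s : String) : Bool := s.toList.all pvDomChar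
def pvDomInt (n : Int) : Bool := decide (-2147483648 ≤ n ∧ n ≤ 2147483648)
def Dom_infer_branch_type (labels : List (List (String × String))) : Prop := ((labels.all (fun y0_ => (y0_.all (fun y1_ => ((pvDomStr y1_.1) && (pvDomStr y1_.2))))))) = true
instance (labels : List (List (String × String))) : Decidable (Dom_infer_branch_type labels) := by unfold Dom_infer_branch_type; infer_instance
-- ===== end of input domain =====

-- B is a single pass over the labels collecting the distinct branch types in a set (objective: simpler).

-- module-level constant shared by both Pythons (an association list with distinct keys)
def LABEL_TO_TYPE : List (String × String) :=
  [("bug", "fix"), ("enhancement", "feat"), ("documentation", "docs"), ("dx", "chore")]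

-- label["name"].lower(); total form (first-match assoc lookup) — Pre_ excludes labels without a "name" key (KeyError)
def pvLName (l : List (String × String)) : String :=
  PySem.Str.lower (((List.find? (fun p => p.1 == "name") l).map Prod.snd).getD "")

-- ===== PORT A =====
def infer_branch_type (labels : List (List (String × String))) : Option String :=
  let label_names : PySem.Set String := PySem.Set.ofList (labels.map pvLName)
  let matchList : List String :=
    LABEL_TO_TYPE.foldl
      (fun m p => if PySem.Set.contains label_names p.1 then m ++ [p.2] else m) []
  let unique_matches := PySem.List.dedup matchList
  if unique_matches.length = 1 then PySem.List.pyGet? unique_matches 0 else none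

-- ===== PORT B =====
-- LABEL_TO_TYPE.get(name): first-match lookup in the literal table (keys are distinct, exact)
def pvTableGet (x : String) : Option String :=
  (List.find? (fun p => p.1 == x) LABEL_TO_TYPE).map Prod.snd

def infer_branch_type_alt (labels : List (List (String × String))) : Option String :=
  let types : PySem.Set String :=
    labels.foldl
      (fun s l =>
        match pvTableGet (pvLName l) with
        | some t => PySem.Set.add s t
        | none => s) PySem.Set.empty
  if types.length = 1 then types.head? else none

-- ===== PRECONDITION & SPEC =====
-- Pre_ excludes exactly the labels lacking a "name" key, on which the Python (A and B alike) raises KeyError.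
def Pre_infer_branch_type (labels : List (List (String × String))) : Prop :=
  (labels.all (fun l => l.any (fun p => p.1 == "name"))) = true
instance (labels : List (List (String × String))) : Decidable (Pre_infer_branch_type labels) := by
  unfold Pre_infer_branch_type; infer_instance

def pvWitness_infer_branch_type : (List (List (String × String))) := [[("name", "Bug")]]

def Spec_infer_branch_type (labels : List (List (String × String))) (out : Option String) : Prop := out = infer_branch_type_alt labels
instance (labels : List (List (String × String))) (out : Option String) : Decidable (Spec_infer_branch_type labels out) := by unfold Spec_infer_branch_type; infer_instance

-- ===== CLAIM (what is proved, stated in full; the proofs are below) =====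
def Claim_equal_infer_branch_type : Prop := ∀ (labels : List (List (String × String))), Dom_infer_branch_type labels → Pre_infer_branch_type labels → Spec_infer_branch_type labels (infer_branch_type labels)

-- ===== LEMMAS AND PROOFS =====

-- the literal table's lookup, spelled out
lemma lookup_table (x : String) :
    pvTableGet x =
      if x = "bug" then some "fix"
      else if x = "enhancement" then some "feat"
      else if x = "documentation" then some "docs"
      else if x = "dx" then some "chore"
      else none := by
  by_cases h1 : x = "bug"
  · subst h1; decide
  by_cases h2 : x = "enhancement"
  · subst h2; decide
  by_cases h3 : x = "documentation"
  · subst h3; decide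
  by_cases h4 : x = "dx"
  · subst h4; decide
  have e1 : ("bug" == x) = false := by simp [Ne.symm h1]
  have e2 : ("enhancement" == x) = false := by simp [Ne.symm h2]
  have e3 : ("documentation" == x) = false := by simp [Ne.symm h3]
  have e4 : ("dx" == x) = false := by simp [Ne.symm h4]
  simp [pvTableGet, LABEL_TO_TYPE, List.find?, e1, e2, e3, e4, h1, h2, h3, h4]

-- membership in B's accumulated set
lemma mem_foldB (labels : List (List (String × String))) (s : PySem.Set String) (t : String) :
    t ∈ labels.foldl
        (fun s l =>
          match pvTableGet (pvLName l) with
          | some u => PySem.Set.add s u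
          | none => s) s ↔
      t ∈ s ∨ ∃ l ∈ labels, pvTableGet (pvLName l) = some t := by
  induction labels generalizing s with
  | nil => simp
  | cons l ls ih =>
    simp only [List.foldl_cons, ih]
    cases h : pvTableGet (pvLName l) with
    | none =>
      simp only [h]
      constructor
      · rintro (h1 | ⟨l', hl', hg⟩)
        · exact Or.inl h1
        · exact Or.inr ⟨l', List.mem_cons_of_mem _ hl', hg⟩
      · rintro (h1 | ⟨l', hl', hg⟩)
        · exact Or.inl h1
        · rcases List.mem_cons.mp hl' with rfl | hl''
          · rw [h] at hg; exact absurd hg (by simp)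
          · exact Or.inr ⟨l', hl'', hg⟩
    | some u =>
      simp only [h, PySem.Set.mem_add]
      constructor
      · rintro (⟨h1 | rfl⟩ | ⟨l', hl', hg⟩)
        · exact Or.inl h1
        · exact Or.inr ⟨l, List.mem_cons_self, h⟩
        · exact Or.inr ⟨l', List.mem_cons_of_mem _ hl', hg⟩
      · rintro (h1 | ⟨l', hl', hg⟩)
        · exact Or.inl (Or.inl h1)
        · rcases List.mem_cons.mp hl' with rfl | hl''
          · rw [h] at hg; exact Or.inl (Or.inr (Option.some.inj hg).symm)
          · exact Or.inr ⟨l', hl'', hg⟩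

-- B's set is duplicate-free
lemma nodup_foldB (labels : List (List (String × String))) (s : PySem.Set String)
    (hs : s.Nodup) :
    (labels.foldl
        (fun s l =>
          match pvTableGet (pvLName l) with
          | some u => PySem.Set.add s u
          | none => s) s).Nodup := by
  induction labels generalizing s with
  | nil => exact hs
  | cons l ls ih =>
    simp only [List.foldl_cons]
    cases h : pvTableGet (pvLName l) with
    | none => simp only [h]; exact ih s hs
    | some u => simp only [h]; exact ih _ (PySem.Set.nodup_add s u hs)

-- a duplicate-free list whose members are exactly {a} is [a]
lemma nodup_eq_singleton {a : String} (T : List String) (h : T.Nodup)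
    (hm : ∀ t, t ∈ T ↔ t = a) : T = [a] := by
  cases T with
  | nil => exact absurd ((hm a).mpr rfl) (by simp)
  | cons x xs =>
    have hx : x = a := (hm x).mp (by simp)
    subst hx
    cases xs with
    | nil => rfl
    | cons y ys =>
      have hy : y = x := (hm y).mp (by simp)
      subst hy
      simp at h

-- a list with two distinct members has length ≠ 1
lemma length_ne_one_of_two_mem {a b : String} (T : List String)
    (ha : a ∈ T) (hb : b ∈ T) (hab : a ≠ b) : T.length ≠ 1 := by
  intro hlen
  obtain ⟨x, rfl⟩ := List.length_eq_one_iff.mp hlen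
  simp at ha hb
  exact hab (ha.trans hb.symm)

-- ===== VERDICT (by name: the statement is the Claim_ definition above) =====
theorem infer_branch_type_spec : Claim_equal_infer_branch_type := by
  intro labels _ _
  unfold Spec_infer_branch_type infer_branch_type infer_branch_type_alt
  simp only []
  set ns := labels.map pvLName with hns
  have hcont : ∀ x, PySem.Set.contains (PySem.Set.ofList ns) x = decide (x ∈ ns) := by
    intro x
    simp [PySem.Set.contains_iff, PySem.Set.mem_ofList]
  set T := labels.foldl
      (fun s l =>
        match pvTableGet (pvLName l) with
        | some u => PySem.Set.add s u
        | none => s) PySem.Set.empty with hT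
  have hmem : ∀ t, t ∈ T ↔ ∃ l ∈ labels, pvTableGet (pvLName l) = some t := by
    intro t; rw [hT, mem_foldB]; simp [PySem.Set.empty]
  have hnodup : T.Nodup := nodup_foldB labels _ (by simp [PySem.Set.empty])
  have hmem' : ∀ t, t ∈ T ↔
      (t = "fix" ∧ "bug" ∈ ns) ∨ (t = "feat" ∧ "enhancement" ∈ ns) ∨
      (t = "docs" ∧ "documentation" ∈ ns) ∨ (t = "chore" ∧ "dx" ∈ ns) := by
    intro t
    rw [hmem]
    constructor
    · rintro ⟨l, hl, hget⟩
      rw [lookup_table] at hget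
      have hn : pvLName l ∈ ns := by rw [hns]; exact List.mem_map_of_mem hl
      split_ifs at hget with h1 h2 h3 h4 <;> simp_all
    · have memn : ∀ x, x ∈ ns → ∃ l ∈ labels, pvLName l = x := by
        intro x hx; rw [hns] at hx
        obtain ⟨l, hl, rfl⟩ := List.mem_map.mp hx
        exact ⟨l, hl, rfl⟩
      rintro (⟨rfl, hx⟩ | ⟨rfl, hx⟩ | ⟨rfl, hx⟩ | ⟨rfl, hx⟩) <;>
        · obtain ⟨l, hl, hlx⟩ := memn _ hx
          exact ⟨l, hl, by rw [lookup_table, hlx]; decide⟩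
  clear hmem hT
  by_cases c1 : "bug" ∈ ns <;> by_cases c2 : "enhancement" ∈ ns <;>
    by_cases c3 : "documentation" ∈ ns <;> by_cases c4 : "dx" ∈ ns
  · simp only [LABEL_TO_TYPE, List.foldl_cons, List.foldl_nil, hcont, c1, c2, c3, c4,
      decide_true, decide_false, if_true, Bool.false_eq_true, if_false,
      List.nil_append, List.cons_append]
    simp only [c1, c2, c3, c4, and_true, and_false, or_false, false_or] at hmem'
    rw [if_neg (by decide)]
    rw [if_neg (length_ne_one_of_two_mem T ((hmem' "fix").mpr (by tauto))
        ((hmem' "feat").mpr (by tauto)) (by decide))]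
  · simp only [LABEL_TO_TYPE, List.foldl_cons, List.foldl_nil, hcont, c1, c2, c3, c4,
      decide_true, decide_false, if_true, Bool.false_eq_true, if_false,
      List.nil_append, List.cons_append]
    simp only [c1, c2, c3, c4, and_true, and_false, or_false, false_or] at hmem'
    rw [if_neg (by decide)]
    rw [if_neg (length_ne_one_of_two_mem T ((hmem' "fix").mpr (by tauto))
        ((hmem' "feat").mpr (by tauto)) (by decide))]
  · simp only [LABEL_TO_TYPE, List.foldl_cons, List.foldl_nil, hcont, c1, c2, c3, c4,
      decide_true, decide_false, if_true, Bool.false_eq_true, if_false,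
      List.nil_append, List.cons_append]
    simp only [c1, c2, c3, c4, and_true, and_false, or_false, false_or] at hmem'
    rw [if_neg (by decide)]
    rw [if_neg (length_ne_one_of_two_mem T ((hmem' "fix").mpr (by tauto))
        ((hmem' "feat").mpr (by tauto)) (by decide))]
  · simp only [LABEL_TO_TYPE, List.foldl_cons, List.foldl_nil, hcont, c1, c2, c3, c4,
      decide_true, decide_false, if_true, Bool.false_eq_true, if_false,
      List.nil_append, List.cons_append]
    simp only [c1, c2, c3, c4, and_true, and_false, or_false, false_or] at hmem'
    rw [if_neg (by decide)]
    rw [if_neg (length_ne_one_of_two_mem T ((hmem' "fix").mpr (by tauto))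
        ((hmem' "feat").mpr (by tauto)) (by decide))]
  · simp only [LABEL_TO_TYPE, List.foldl_cons, List.foldl_nil, hcont, c1, c2, c3, c4,
      decide_true, decide_false, if_true, Bool.false_eq_true, if_false,
      List.nil_append, List.cons_append]
    simp only [c1, c2, c3, c4, and_true, and_false, or_false, false_or] at hmem'
    rw [if_neg (by decide)]
    rw [if_neg (length_ne_one_of_two_mem T ((hmem' "fix").mpr (by tauto))
        ((hmem' "docs").mpr (by tauto)) (by decide))]
  · simp only [LABEL_TO_TYPE, List.foldl_cons, List.foldl_nil, hcont, c1, c2, c3, c4,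
      decide_true, decide_false, if_true, Bool.false_eq_true, if_false,
      List.nil_append, List.cons_append]
    simp only [c1, c2, c3, c4, and_true, and_false, or_false, false_or] at hmem'
    rw [if_neg (by decide)]
    rw [if_neg (length_ne_one_of_two_mem T ((hmem' "fix").mpr (by tauto))
        ((hmem' "docs").mpr (by tauto)) (by decide))]
  · simp only [LABEL_TO_TYPE, List.foldl_cons, List.foldl_nil, hcont, c1, c2, c3, c4,
      decide_true, decide_false, if_true, Bool.false_eq_true, if_false,
      List.nil_append, List.cons_append]
    simp only [c1, c2, c3, c4, and_true, and_false, or_false, false_or] at hmem'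
    rw [if_neg (by decide)]
    rw [if_neg (length_ne_one_of_two_mem T ((hmem' "fix").mpr (by tauto))
        ((hmem' "chore").mpr (by tauto)) (by decide))]
  · simp only [LABEL_TO_TYPE, List.foldl_cons, List.foldl_nil, hcont, c1, c2, c3, c4,
      decide_true, decide_false, if_true, Bool.false_eq_true, if_false,
      List.nil_append, List.cons_append]
    simp only [c1, c2, c3, c4, and_true, and_false, or_false, false_or] at hmem'
    have hT1 := nodup_eq_singleton (a := "fix") T hnodup (fun t => by rw [hmem'])
    rw [hT1]; decide
  · simp only [LABEL_TO_TYPE, List.foldl_cons, List.foldl_nil, hcont, c1, c2, c3, c4,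
      decide_true, decide_false, if_true, Bool.false_eq_true, if_false,
      List.nil_append, List.cons_append]
    simp only [c1, c2, c3, c4, and_true, and_false, or_false, false_or] at hmem'
    rw [if_neg (by decide)]
    rw [if_neg (length_ne_one_of_two_mem T ((hmem' "feat").mpr (by tauto))
        ((hmem' "docs").mpr (by tauto)) (by decide))]
  · simp only [LABEL_TO_TYPE, List.foldl_cons, List.foldl_nil, hcont, c1, c2, c3, c4,
      decide_true, decide_false, if_true, Bool.false_eq_true, if_false,
      List.nil_append, List.cons_append]
    simp only [c1, c2, c3, c4, and_true, and_false, or_false, false_or] at hmem'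
    rw [if_neg (by decide)]
    rw [if_neg (length_ne_one_of_two_mem T ((hmem' "feat").mpr (by tauto))
        ((hmem' "docs").mpr (by tauto)) (by decide))]
  · simp only [LABEL_TO_TYPE, List.foldl_cons, List.foldl_nil, hcont, c1, c2, c3, c4,
      decide_true, decide_false, if_true, Bool.false_eq_true, if_false,
      List.nil_append, List.cons_append]
    simp only [c1, c2, c3, c4, and_true, and_false, or_false, false_or] at hmem'
    rw [if_neg (by decide)]
    rw [if_neg (length_ne_one_of_two_mem T ((hmem' "feat").mpr (by tauto))
        ((hmem' "chore").mpr (by tauto)) (by decide))]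
  · simp only [LABEL_TO_TYPE, List.foldl_cons, List.foldl_nil, hcont, c1, c2, c3, c4,
      decide_true, decide_false, if_true, Bool.false_eq_true, if_false,
      List.nil_append, List.cons_append]
    simp only [c1, c2, c3, c4, and_true, and_false, or_false, false_or] at hmem'
    have hT1 := nodup_eq_singleton (a := "feat") T hnodup (fun t => by rw [hmem'])
    rw [hT1]; decide
  · simp only [LABEL_TO_TYPE, List.foldl_cons, List.foldl_nil, hcont, c1, c2, c3, c4,
      decide_true, decide_false, if_true, Bool.false_eq_true, if_false,
      List.nil_append, List.cons_append]
    simp only [c1, c2, c3, c4, and_true, and_false, or_false, false_or] at hmem'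
    rw [if_neg (by decide)]
    rw [if_neg (length_ne_one_of_two_mem T ((hmem' "docs").mpr (by tauto))
        ((hmem' "chore").mpr (by tauto)) (by decide))]
  · simp only [LABEL_TO_TYPE, List.foldl_cons, List.foldl_nil, hcont, c1, c2, c3, c4,
      decide_true, decide_false, if_true, Bool.false_eq_true, if_false,
      List.nil_append, List.cons_append]
    simp only [c1, c2, c3, c4, and_true, and_false, or_false, false_or] at hmem'
    have hT1 := nodup_eq_singleton (a := "docs") T hnodup (fun t => by rw [hmem'])
    rw [hT1]; decide
  · simp only [LABEL_TO_TYPE, List.foldl_cons, List.foldl_nil, hcont, c1, c2, c3, c4,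
      decide_true, decide_false, if_true, Bool.false_eq_true, if_false,
      List.nil_append, List.cons_append]
    simp only [c1, c2, c3, c4, and_true, and_false, or_false, false_or] at hmem'
    have hT1 := nodup_eq_singleton (a := "chore") T hnodup (fun t => by rw [hmem'])
    rw [hT1]; decide
  · simp only [LABEL_TO_TYPE, List.foldl_cons, List.foldl_nil, hcont, c1, c2, c3, c4,
      decide_true, decide_false, if_true, Bool.false_eq_true, if_false,
      List.nil_append, List.cons_append]
    simp only [c1, c2, c3, c4, and_true, and_false, or_false, false_or] at hmem'
    have hT0 : T = [] := List.eq_nil_iff_forall_not_mem.mpr (fun t ht => (hmem' t).mp ht)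
    rw [hT0, if_neg (by decide), if_neg (by decide)]
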